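-- pv_equiv track=rewrite | github.com/xared2404/analisis_medios | src/clean_entities.py | looks_like_media_or_agency
-- ===== SOURCE A (Python) =====
-- def looks_like_media_or_agency(entity_canon: str, media_set: set, agency_set: set) -> bool:
--     """
--     Regla robusta:
--     - match exacto en medios/agencias
--     - o contiene el nombre de un medio/agencia como token significativo
--       (ej: "el universal deportes" o "reuters staff")
--     """
--     if not entity_canon:
--         return True
--
--     if entity_canon in media_set or entity_canon in agency_set:
--         return True
--
--     # token check para evitar falsos positivos por substrings raros
--     tokens = set(entity_canon.split())
--     # match tokenizado con nombres cortos
--     short_agency_tokens = {"reuters", "afp", "efe", "ap", "bbc", "cnn"}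
--     if tokens.intersection(short_agency_tokens):
--         return True
--
--     # contains check (frases)
--     # (esto atrapa "el universal deportes", "infobae mexico", "agencia reuters", etc.)
--     for m in media_set:
--         if len(m) >= 6 and m in entity_canon:
--             return True
--     for a in agency_set:
--         if len(a) >= 3 and a in entity_canon:
--             return True
--
--     return False
-- ===== SOURCE B (Python) =====
-- def looks_like_media_or_agency(entity_canon: str, media_set: set, agency_set: set) -> bool:
--     if not entity_canon:
--         return True
--     if entity_canon in media_set or entity_canon in agency_set:
--         return True
--     short_agency_tokens = {"reuters", "afp", "efe", "ap", "bbc", "cnn"}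
--     if not short_agency_tokens.isdisjoint(entity_canon.split()):
--         return True
--     # Index the names by length class once, then enumerate the entity's
--     # substrings (len >= 3) and test set membership instead of scanning the names.
--     media_long = {m for m in media_set if len(m) >= 6}
--     agency_long = {a for a in agency_set if len(a) >= 3}
--     n = len(entity_canon)
--     for i in range(n):
--         for j in range(i + 3, n + 1):
--             sub = entity_canon[i:j]
--             if sub in agency_long or (j - i >= 6 and sub in media_long):
--                 return True
--     return False
-- ===== Notes on version B (the rewrite author's own statement) =====
-- stated objective: alternative
-- what changed: Instead of scanning every media/agency name and substring-searching each in the entity, B builds length-filtered sets of the names once and enumerates the entity's substrings (len>=3), testing each by set membership; cost depends on the entity length squared instead of the total size of the name sets.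
import Mathlib
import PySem

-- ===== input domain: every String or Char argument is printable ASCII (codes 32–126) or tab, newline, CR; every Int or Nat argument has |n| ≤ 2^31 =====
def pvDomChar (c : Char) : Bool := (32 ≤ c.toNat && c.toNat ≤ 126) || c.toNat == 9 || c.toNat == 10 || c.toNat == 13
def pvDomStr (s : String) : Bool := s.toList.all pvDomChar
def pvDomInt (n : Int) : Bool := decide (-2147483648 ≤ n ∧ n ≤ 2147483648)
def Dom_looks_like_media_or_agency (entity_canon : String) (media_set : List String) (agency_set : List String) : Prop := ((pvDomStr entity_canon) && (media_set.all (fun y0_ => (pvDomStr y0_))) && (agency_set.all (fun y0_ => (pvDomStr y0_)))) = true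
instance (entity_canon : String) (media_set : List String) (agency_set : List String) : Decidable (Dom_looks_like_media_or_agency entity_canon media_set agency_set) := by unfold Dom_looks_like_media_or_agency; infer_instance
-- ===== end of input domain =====

-- B replaces A's per-name substring searches by enumerating the entity's substrings and testing them
-- against length-filtered hash sets of the names (alternative algorithm; cost depends on the entity length
-- instead of the total size of the name sets).

-- ===== PORT A =====
def shortAgencyTokens : List String := ["reuters", "afp", "efe", "ap", "bbc", "cnn"]

def looks_like_media_or_agency (entity_canon : String) (media_set : List String) (agency_set : List String) : Bool :=
  if entity_canon = "" then true
  else if media_set.contains entity_canon || agency_set.contains entity_canon then true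
  else
    let tokens := PySem.Set.ofList (PySem.Str.split₀ entity_canon)
    if !(PySem.Set.inter tokens (PySem.Set.ofList shortAgencyTokens)).isEmpty then true
    else if media_set.any (fun m => decide (6 ≤ PySem.Str.len m) && PySem.Str.isIn m entity_canon) then true
    else if agency_set.any (fun a => decide (3 ≤ PySem.Str.len a) && PySem.Str.isIn a entity_canon) then true
    else false

-- ===== PORT B =====
def looks_like_media_or_agency_alt (entity_canon : String) (media_set : List String) (agency_set : List String) : Bool :=
  if entity_canon = "" then true
  else if media_set.contains entity_canon || agency_set.contains entity_canon then true
  else if !(PySem.Set.isdisjoint (PySem.Set.ofList shortAgencyTokens) (PySem.Str.split₀ entity_canon)) then true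
  else
    let media_long := PySem.Set.ofList (media_set.filter (fun m => decide (6 ≤ PySem.Str.len m)))
    let agency_long := PySem.Set.ofList (agency_set.filter (fun a => decide (3 ≤ PySem.Str.len a)))
    let n : Int := PySem.Str.len entity_canon
    (PySem.List.pyRange 0 n 1).any (fun i =>
      (PySem.List.pyRange (i + 3) (n + 1) 1).any (fun j =>
        let sub := PySem.Str.slice entity_canon (some i) (some j)
        PySem.Set.contains agency_long sub || (decide (6 ≤ j - i) && PySem.Set.contains media_long sub)))

-- ===== PRECONDITION & SPEC =====
def Spec_looks_like_media_or_agency (entity_canon : String) (media_set : List String) (agency_set : List String) (out : Bool) : Prop := out = looks_like_media_or_agency_alt entity_canon media_set agency_set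
instance (entity_canon : String) (media_set : List String) (agency_set : List String) (out : Bool) : Decidable (Spec_looks_like_media_or_agency entity_canon media_set agency_set out) := by unfold Spec_looks_like_media_or_agency; infer_instance

-- ===== CLAIM (what is proved, stated in full; the proofs are below) =====
def Claim_equal_looks_like_media_or_agency : Prop := ∀ (entity_canon : String) (media_set : List String) (agency_set : List String), Dom_looks_like_media_or_agency entity_canon media_set agency_set → Spec_looks_like_media_or_agency entity_canon media_set agency_set (looks_like_media_or_agency entity_canon media_set agency_set)

-- ===== LEMMAS AND PROOFS =====

theorem looks_tokens_eq (e : String) :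
    (!(PySem.Set.inter (PySem.Set.ofList (PySem.Str.split₀ e)) (PySem.Set.ofList shortAgencyTokens)).isEmpty)
    = (!(PySem.Set.isdisjoint (PySem.Set.ofList shortAgencyTokens) (PySem.Str.split₀ e))) := by
  have h : ((PySem.Set.inter (PySem.Set.ofList (PySem.Str.split₀ e)) (PySem.Set.ofList shortAgencyTokens)).isEmpty)
      = (PySem.Set.isdisjoint (PySem.Set.ofList shortAgencyTokens) (PySem.Str.split₀ e)) := by
    rw [Bool.eq_iff_iff, List.isEmpty_iff, List.eq_nil_iff_forall_not_mem,
      PySem.Set.isdisjoint_iff]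
    constructor
    · intro h x hx hx2
      exact h x ((PySem.Set.mem_inter _ _ _).2 ⟨(PySem.Set.mem_ofList _ _).2 hx2, (PySem.Set.mem_ofList _ _).2 hx⟩)
    · intro h x hx
      rcases (PySem.Set.mem_inter _ _ _).1 hx with ⟨h1, h2⟩
      exact h x ((PySem.Set.mem_ofList _ _).1 h2) ((PySem.Set.mem_ofList _ _).1 h1)
  rw [h]

theorem exists_slice_of_infix (e m : String) (h3 : 3 ≤ m.toList.length)
    (h : m.toList <:+: e.toList) :
    ∃ i j : Int, 0 ≤ i ∧ i < (e.toList.length : Int) ∧ i + 3 ≤ j ∧ j < (e.toList.length : Int) + 1 ∧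
      j - i = (m.toList.length : Int) ∧ PySem.Str.slice e (some i) (some j) = m := by
  have hin : PySem.Chars.isIn m.toList e.toList = true :=
    (PySem.Chars.isIn_iff_infix _ _).2 h
  obtain ⟨i₀, hpre⟩ := (PySem.Chars.exists_prefix_drop_iff_isIn m.toList e.toList).2 hin
  have hlen : m.toList.length ≤ e.toList.length - i₀ := by
    have := hpre.length_le
    simpa using this
  have hi₀ : i₀ < e.toList.length := by omega
  refine ⟨(i₀ : Int), (i₀ : Int) + (m.toList.length : Int), by positivity, by exact_mod_cast hi₀,
    by omega, by omega, by ring, ?_⟩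
  rw [← String.toList_inj, PySem.Str.toList_slice, PySem.Chars.slice_eq_listSlice]
  have : (i₀ : Int) + (m.toList.length : Int) = ((i₀ + m.toList.length : Nat) : Int) := by push_cast; ring
  rw [this, PySem.List.slice_natCast]
  have htake := List.prefix_iff_eq_take.1 hpre
  simp only [Nat.add_sub_cancel_left]
  exact htake.symm

theorem infix_of_slice (e : String) (i j : Int) (h0 : 0 ≤ i) (h0' : 0 ≤ j) :
    (PySem.Str.slice e (some i) (some j)).toList <:+: e.toList := by
  rw [PySem.Str.toList_slice, PySem.Chars.slice_eq_listSlice, PySem.List.slice_toNat _ h0 h0']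
  exact ((List.take_prefix _ _).isInfix).trans (List.drop_suffix _ _).isInfix

theorem looks_main_eq (e : String) (ms as : List String) :
    ((ms.any (fun m => decide (6 ≤ PySem.Str.len m) && PySem.Str.isIn m e)) ||
     (as.any (fun a => decide (3 ≤ PySem.Str.len a) && PySem.Str.isIn a e)))
    = ((PySem.List.pyRange 0 (PySem.Str.len e) 1).any (fun i =>
        (PySem.List.pyRange (i + 3) ((PySem.Str.len e : Int) + 1) 1).any (fun j =>
          let sub := PySem.Str.slice e (some i) (some j)
          PySem.Set.contains (PySem.Set.ofList (as.filter (fun a => decide (3 ≤ PySem.Str.len a)))) sub ||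
            (decide (6 ≤ j - i) && PySem.Set.contains (PySem.Set.ofList (ms.filter (fun m => decide (6 ≤ PySem.Str.len m)))) sub)))) := by
  rw [Bool.eq_iff_iff]
  simp only [List.any_eq_true, Bool.or_eq_true, Bool.and_eq_true, decide_eq_true_eq,
    PySem.Str.isIn_iff_infix, PySem.List.mem_pyRange_one, PySem.Set.contains_iff,
    PySem.Set.mem_ofList, List.mem_filter, PySem.Str.len_eq]
  constructor
  · rintro (⟨m, hm, h6, hinf⟩ | ⟨a, ha, h3, hinf⟩)
    · obtain ⟨i, j, hi0, hin, hij3, hjn, hlen, hsub⟩ :=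
        exists_slice_of_infix e m (by exact_mod_cast (by omega : (3:Int) ≤ (m.toList.length : Int))) hinf
      exact ⟨i, ⟨hi0, hin⟩, j, ⟨hij3, hjn⟩, Or.inr ⟨by omega, by rw [hsub]; exact ⟨hm, h6⟩⟩⟩
    · obtain ⟨i, j, hi0, hin, hij3, hjn, hlen, hsub⟩ := exists_slice_of_infix e a (by exact_mod_cast h3) hinf
      exact ⟨i, ⟨hi0, hin⟩, j, ⟨hij3, hjn⟩, Or.inl (by rw [hsub]; exact ⟨ha, h3⟩)⟩
  · rintro ⟨i, ⟨hi0, hin⟩, j, ⟨hij3, hjn⟩, hcase⟩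
    have hinf := infix_of_slice e i j hi0 (by omega)
    rcases hcase with ⟨⟨ha, h3⟩⟩ | ⟨h6ji, ⟨hm, h6⟩⟩
    · exact Or.inr ⟨_, ha, h3, hinf⟩
    · exact Or.inl ⟨_, hm, h6, hinf⟩
-- ===== VERDICT (by name: the statement is the Claim_ definition above) =====
theorem looks_like_media_or_agency_spec : Claim_equal_looks_like_media_or_agency := by
  intro e ms as _
  unfold Spec_looks_like_media_or_agency looks_like_media_or_agency looks_like_media_or_agency_alt
  by_cases h1 : e = "" <;> simp only [h1, if_true, if_false]
  by_cases h2 : (ms.contains e || as.contains e) = true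
  · simp only [h2, if_true]
  · simp only [h2, if_false, Bool.false_eq_true]
    rw [looks_tokens_eq e]
    by_cases h3 : (!(PySem.Set.isdisjoint (PySem.Set.ofList shortAgencyTokens) (PySem.Str.split₀ e))) = true
    · simp only [h3, if_true]
    · simp only [if_neg (fun h => h3 h)]
      have hmain := looks_main_eq e ms as
      cases hx : ms.any (fun m => decide (6 ≤ PySem.Str.len m) && PySem.Str.isIn m e) <;>
        cases hy : as.any (fun a => decide (3 ≤ PySem.Str.len a) && PySem.Str.isIn a e) <;>
        rw [hx, hy] at hmain <;> simp only [← hmain] <;> rfl
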